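-- pv_equiv track=rewrite | github.com/thehalleyyoung/deppy | deppy/lean/type_translation.py | _fold_sum
-- ===== SOURCE A (Python) =====
-- def _fold_sum(types: list[str]) -> str:
--     """Fold a list of Lean types into nested ``Sum`` — left-
--     associative.  ``[A, B, C]`` → ``(Sum (Sum A B) C)``."""
--     if not types:
--         return "Unit"
--     if len(types) == 1:
--         return types[0]
--     out = f"(Sum {types[0]} {types[1]})"
--     for t in types[2:]:
--         out = f"(Sum {out} {t})"
--     return out
-- ===== SOURCE B (Python) =====
-- def _fold_sum(types: list[str]) -> str:
--     """Same nested-Sum string, built in one pass: count the opening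
--     "(Sum " wrappers up front, then append one " <t>)" suffix per tail
--     element -- no accumulator string rebuilt each iteration."""
--     if not types:
--         return "Unit"
--     prefix = "(Sum " * (len(types) - 1)
--     return prefix + types[0] + "".join(f" {t})" for t in types[1:])
-- ===== Notes on version B (the rewrite author's own statement) =====
-- stated objective: faster
-- what changed: Instead of re-wrapping the accumulator string at every iteration, B emits all '(Sum ' prefixes at once via string repetition and joins one ' <t>)' suffix per tail element, producing the identical left-associative nesting in one linear pass.
import Mathlib
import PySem

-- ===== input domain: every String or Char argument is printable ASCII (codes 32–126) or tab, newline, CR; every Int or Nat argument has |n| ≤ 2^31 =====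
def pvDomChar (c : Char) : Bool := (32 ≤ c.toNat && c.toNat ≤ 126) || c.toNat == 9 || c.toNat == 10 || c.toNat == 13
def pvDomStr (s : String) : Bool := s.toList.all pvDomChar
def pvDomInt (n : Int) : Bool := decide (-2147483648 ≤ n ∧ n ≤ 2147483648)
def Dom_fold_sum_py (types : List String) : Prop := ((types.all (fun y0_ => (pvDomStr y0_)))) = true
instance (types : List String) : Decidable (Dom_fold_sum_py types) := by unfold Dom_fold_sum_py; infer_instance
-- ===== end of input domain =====

-- B builds the identical nested-Sum string in one linear pass (repeated prefix + per-element
-- suffixes) instead of re-wrapping an accumulator string each iteration.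


-- ===== PORT A =====
-- literal transliteration: empty → "Unit", singleton → types[0], else seed with the first
-- two elements and re-wrap the accumulator for each remaining element (types[2:])
def fold_sum_py (types : List String) : String :=
  match types with
  | [] => "Unit"
  | [t] => t
  | t0 :: t1 :: rest =>
    rest.foldl (fun out t => "(Sum " ++ out ++ " " ++ t ++ ")")
      ("(Sum " ++ t0 ++ " " ++ t1 ++ ")")

-- ===== PORT B =====
-- literal transliteration of Source B: '(Sum ' * (n-1)  ++  types[0]  ++  join of ' <t>)' over types[1:]
def fold_sum_py_alt (types : List String) : String :=
  match types with
  | [] => "Unit"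
  | t0 :: rest =>
    String.join (List.replicate rest.length "(Sum ") ++ t0 ++
      String.join (rest.map (fun t => " " ++ t ++ ")"))

-- ===== PRECONDITION & SPEC =====
def Spec_fold_sum_py (types : List String) (out : String) : Prop := out = fold_sum_py_alt types
instance (types : List String) (out : String) : Decidable (Spec_fold_sum_py types out) := by unfold Spec_fold_sum_py; infer_instance

-- ===== CLAIM (what is proved, stated in full; the proofs are below) =====
def Claim_equal_fold_sum_py : Prop := ∀ (types : List String), Dom_fold_sum_py types → Spec_fold_sum_py types (fold_sum_py types)

-- ===== LEMMAS AND PROOFS =====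

-- a block x commutes with the flattening of n copies of itself
theorem pv_rep_flatten_comm {α : Type} (n : Nat) (x : List α) :
    x ++ (List.replicate n x).flatten = (List.replicate n x).flatten ++ x := by
  induction n with
  | zero => simp
  | succ n ih =>
    simp only [List.replicate_succ, List.flatten_cons]
    rw [List.append_assoc, ← ih]

-- pull a block x that commutes with F out to the front of F ++ (x ++ r)
theorem pv_pull_front {α : Type} (F x r : List α) (h : x ++ F = F ++ x) :
    F ++ (x ++ r) = x ++ (F ++ r) := by
  rw [← List.append_assoc, ← h, List.append_assoc]

-- A's accumulator loop equals B's prefix-count + suffix-join form, for any seed string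
theorem pv_fold_eq (rest : List String) (init : String) :
    rest.foldl (fun out t => "(Sum " ++ out ++ " " ++ t ++ ")") init
      = String.join (List.replicate rest.length "(Sum ") ++ init ++
          String.join (rest.map (fun t => " " ++ t ++ ")")) := by
  induction rest generalizing init with
  | nil =>
    apply String.toList_inj.mp
    simp [String.toList_join]
  | cons t ts ih =>
    simp only [List.foldl_cons, List.map_cons, List.length_cons]
    rw [ih]
    apply String.toList_inj.mp
    simp only [String.toList_append, String.toList_join, List.map_cons, List.map_replicate,
      List.replicate_succ, List.flatten_cons, List.append_assoc]
    exact pv_pull_front _ _ _ (pv_rep_flatten_comm ts.length "(Sum ".toList)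

-- ===== VERDICT (by name: the statement is the Claim_ definition above) =====
theorem fold_sum_py_spec : Claim_equal_fold_sum_py := by
  intro types _
  unfold Spec_fold_sum_py
  match types with
  | [] => rfl
  | [t] =>
    simp only [fold_sum_py, fold_sum_py_alt]
    apply String.toList_inj.mp
    simp [String.toList_join]
  | t0 :: t1 :: rest =>
    simp only [fold_sum_py, fold_sum_py_alt]
    rw [pv_fold_eq]
    apply String.toList_inj.mp
    simp only [String.toList_append, String.toList_join, List.map_cons, List.map_replicate,
      List.length_cons, List.replicate_succ, List.flatten_cons, List.append_assoc]
    exact pv_pull_front _ _ _ (pv_rep_flatten_comm rest.length "(Sum ".toList)
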